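/-
  THE SANITIZER'S CHECK ROUTINES AS A WALK USES THEM: `User.CheckSpec` (UserX/WalkLemmas.lean) instantiated with the shadow
  predicates of Asan/Shadow.lean.

      AccSmall n mem a      what a call site of `__asan_{load,store}{1,2,4,8}_noabort(a)` must show: the shadow is sealed and the
                            `n` bytes at `a` pass the small check (`AccessibleSmall`)
      AccRange n mem a      the same for `__asan_{load,store}16_noabort` / `…N_noabort` (`Accessible`)
      SmallCheck / RangeCheck       the statement of a routine's contract: THE TARGET of the runtime's proofs (one per routine)
      SmallCheck.mk' / RangeCheck.mk'   … from the `call` part alone: the `has` part is `AccessibleSmall.has` / `Accessible.has`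

  At a call site `u_walk` leaves the goal `AccSmall n s.mem a` (`a` the normalised address, `s` the state at the routine's
  entry, `w_mem : s.mem = …` in the context) and gives the access that follows `w_acc_<addr> : L.Has a n`.
-/
import Asan.Shadow
import UserX.WalkLemmas
namespace Asan
open X86 X86.User

/-- The obligation of a 1-, 2-, 4- or 8-byte check site. -/
def AccSmall (n : Nat) (mem : Mem) (a : Word) : Prop := Sealed mem ∧ AccessibleSmall mem a.toNat n

/-- The obligation of a 16-byte or N-byte check site. -/
def AccRange (n : Nat) (mem : Mem) (a : Word) : Prop := Sealed mem ∧ Accessible mem a.toNat n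

/-- A passed small check puts the range inside the user region (for a layout that maps the low 12 MB). -/
theorem AccSmall.has {L : Layout} {n : Nat} {mem : Mem} {a : Word} (hL : 0xC00000 ≤ L.hi) (hn : 0 < n)
    (h : AccSmall n mem a) : L.Has a n :=
  h.2.has h.1 hn hL

/-- A passed range check puts the range inside the user region. -/
theorem AccRange.has {L : Layout} {n : Nat} {mem : Mem} {a : Word} (hL : 0xC00000 ≤ L.hi) (hn : 0 < n)
    (h : AccRange n mem a) : L.Has a n :=
  h.2.has h.1 hn hL

/-- **The contract of `__asan_{load,store}{1,2,4,8}_noabort` at `entry`** (`n` the size, `clob` the registers it changes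
besides RSP and RFLAGS, `codeOK` "the routine's code is in memory"). -/
abbrev SmallCheck (L : Layout) (μ : Microarch) (I : State → Prop) (codeOK : Mem → Prop) (clob : List Reg) (n : Nat)
    (entry : Word) : Prop :=
  CheckSpec L μ I codeOK clob n (AccSmall n) entry

/-- **The contract of `__asan_{load,store}16_noabort` / `…N_noabort`** for the size `n`. -/
abbrev RangeCheck (L : Layout) (μ : Microarch) (I : State → Prop) (codeOK : Mem → Prop) (clob : List Reg) (n : Nat)
    (entry : Word) : Prop :=
  CheckSpec L μ I codeOK clob n (AccRange n) entry

/-- A small check's contract from its `call` part. -/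
theorem SmallCheck.mk' {L : Layout} {μ : Microarch} {I : State → Prop} {codeOK : Mem → Prop} {clob : List Reg} {n : Nat}
    {entry : Word} (hL : 0xC00000 ≤ L.hi) (hn : 0 < n)
    (call : ∀ (u : State) (ret : Word), u.rip = entry → codeOK u.mem → L.Has (u.reg .rsp) 8 →
      UInt64.ofNat (u.mem.readLE (u.reg .rsp) 8) = ret → ret < 0x40000000 → AccSmall n u.mem (u.reg .rdi) →
      ReachVia L μ I u (Checked clob u ret)) :
    SmallCheck L μ I codeOK clob n entry :=
  ⟨fun _ _ h => h.has hL hn, call⟩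

/-- A range check's contract from its `call` part. -/
theorem RangeCheck.mk' {L : Layout} {μ : Microarch} {I : State → Prop} {codeOK : Mem → Prop} {clob : List Reg} {n : Nat}
    {entry : Word} (hL : 0xC00000 ≤ L.hi) (hn : 0 < n)
    (call : ∀ (u : State) (ret : Word), u.rip = entry → codeOK u.mem → L.Has (u.reg .rsp) 8 →
      UInt64.ofNat (u.mem.readLE (u.reg .rsp) 8) = ret → ret < 0x40000000 → AccRange n u.mem (u.reg .rdi) →
      ReachVia L μ I u (Checked clob u ret)) :
    RangeCheck L μ I codeOK clob n entry :=
  ⟨fun _ _ h => h.has hL hn, call⟩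

end Asan
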